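-- pv_equiv track=rewrite | github.com/RaiderYi/fortune-calendar | tests/test_utils.py | assert_dates_different
-- ===== SOURCE A (Python) =====
-- from typing import Dict, Any, Optional, List
--
-- def assert_dates_different(results: List[Dict], date_field: str = 'date'):
--     """断言不同日期的结果不同"""
--     unique_values = set()
--     for result in results:
--         if date_field in result:
--             unique_values.add(str(result[date_field]))
--
--     assert len(unique_values) > 1, \
--         f"All results should have different {date_field} values"
--     return True
-- ===== SOURCE B (Python) =====
-- def assert_dates_different(results, date_field='date'):
--     """Early-exit scan: keep the first date value seen; succeed as soon as a different one appears."""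
--     first = None
--     have_first = False
--     found_different = False
--     for result in results:
--         if date_field in result:
--             v = str(result[date_field])
--             if not have_first:
--                 first = v
--                 have_first = True
--             elif v != first:
--                 found_different = True
--                 break
--     assert found_different, \
--         f"All results should have different {date_field} values"
--     return True
-- ===== Notes on version B (the rewrite author's own statement) =====
-- stated objective: alternative
-- what changed: B replaces A's set-materialise-then-size check by a single early-exiting scan that keeps only the first value and a found-different flag, stopping at the first value that differs.
import Mathlib
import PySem

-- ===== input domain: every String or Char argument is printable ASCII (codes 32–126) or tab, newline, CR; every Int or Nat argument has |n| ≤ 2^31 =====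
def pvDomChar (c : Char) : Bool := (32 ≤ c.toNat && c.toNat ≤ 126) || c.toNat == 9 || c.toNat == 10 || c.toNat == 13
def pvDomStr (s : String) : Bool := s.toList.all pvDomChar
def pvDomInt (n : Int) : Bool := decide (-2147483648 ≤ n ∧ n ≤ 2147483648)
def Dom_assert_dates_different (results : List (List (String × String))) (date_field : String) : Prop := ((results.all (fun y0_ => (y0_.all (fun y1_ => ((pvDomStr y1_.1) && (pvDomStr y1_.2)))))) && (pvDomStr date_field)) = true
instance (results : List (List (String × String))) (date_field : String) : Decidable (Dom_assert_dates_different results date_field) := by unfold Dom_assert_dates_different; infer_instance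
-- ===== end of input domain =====

-- B changes the algorithm: instead of materialising the set of all date values and sizing it,
-- a single early-exiting scan keeps the first value seen and succeeds on the first differing one.
-- Values are Strings here, so Python's str(result[date_field]) is the identity.

-- ===== PORT A =====
-- 'date_field in result' / 'result[date_field]' on the association list: first matching pair.
def assert_dates_different (results : List (List (String × String))) (date_field : String) : Bool :=
  let unique_values : PySem.Set String :=
    results.foldl (fun s result =>
      match result.find? (fun p => p.1 == date_field) with
      | some p => PySem.Set.add s p.2
      | none => s) PySem.Set.empty
  -- assert len(unique_values) > 1: on failure Python raises (outside Pre_); return True otherwise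
  if unique_values.length > 1 then true else false

-- ===== PORT B =====
-- the loop of Source B: 'first'/'have_first' as an Option, early 'break' as returning true
def adGo (date_field : String) : List (List (String × String)) → Option String → Bool
  | [], _ => false
  | r :: rs, first =>
    match r.find? (fun p => p.1 == date_field) with
    | none => adGo date_field rs first
    | some p =>
      match first with
      | none => adGo date_field rs (some p.2)
      | some f => if p.2 ≠ f then true else adGo date_field rs (some f)

def assert_dates_different_alt (results : List (List (String × String))) (date_field : String) : Bool :=
  adGo date_field results none

-- ===== PRECONDITION & SPEC =====
-- the qualifying date values, in order
def adVals (results : List (List (String × String))) (date_field : String) : List String :=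
  results.filterMap (fun r => (r.find? (fun p => p.1 == date_field)).map (·.2))

-- Pre_: the qualifying date values contain at least two distinct strings;
-- otherwise the Python 'assert' of both A and B raises AssertionError.
def Pre_assert_dates_different (results : List (List (String × String))) (date_field : String) : Prop :=
  ∃ x ∈ adVals results date_field, ∃ y ∈ adVals results date_field, x ≠ y
instance (results : List (List (String × String))) (date_field : String) : Decidable (Pre_assert_dates_different results date_field) := by unfold Pre_assert_dates_different; infer_instance

def pvWitness_assert_dates_different : (List (List (String × String))) × String :=
  ([[("date", "2024-01-01")], [("date", "2024-01-02")]], "date")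

def Spec_assert_dates_different (results : List (List (String × String))) (date_field : String) (out : Bool) : Prop := out = assert_dates_different_alt results date_field
instance (results : List (List (String × String))) (date_field : String) (out : Bool) : Decidable (Spec_assert_dates_different results date_field out) := by unfold Spec_assert_dates_different; infer_instance

-- ===== CLAIM (what is proved, stated in full; the proofs are below) =====
def Claim_equal_assert_dates_different : Prop := ∀ (results : List (List (String × String))) (date_field : String), Dom_assert_dates_different results date_field → Pre_assert_dates_different results date_field → Spec_assert_dates_different results date_field (assert_dates_different results date_field)

-- ===== LEMMAS AND PROOFS =====

-- A's fold over results is the fold of Set.add over the value list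
theorem ad_fold_eq_ofList (results : List (List (String × String))) (date_field : String)
    (s : PySem.Set String) :
    results.foldl (fun s result =>
      match result.find? (fun p => p.1 == date_field) with
      | some p => PySem.Set.add s p.2
      | none => s) s
    = (adVals results date_field).foldl PySem.Set.add s := by
  induction results generalizing s with
  | nil => rfl
  | cons r rs ih =>
    simp only [adVals, List.filterMap_cons, List.foldl_cons]
    cases h : r.find? (fun p => p.1 == date_field) with
    | none =>
      simp only [Option.map_none]
      exact ih s
    | some p =>
      simp only [Option.map_some, List.foldl_cons]
      exact ih (PySem.Set.add s p.2)

theorem two_mem_length {l : List String} {x y : String}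
    (hx : x ∈ l) (hy : y ∈ l) (hne : x ≠ y) : 1 < l.length := by
  match l with
  | [] => cases hx
  | [a] =>
    simp at hx hy; exact absurd (hx.trans hy.symm) hne
  | a :: b :: t => simp

theorem adGo_some_of_exists (date_field : String) (f : String) :
    ∀ (results : List (List (String × String))),
      (∃ y ∈ adVals results date_field, y ≠ f) →
      adGo date_field results (some f) = true := by
  intro results
  induction results with
  | nil => rintro ⟨y, hy, _⟩; cases hy
  | cons r rs ih =>
    rintro ⟨y, hy, hne⟩
    simp only [adGo]
    cases h : r.find? (fun p => p.1 == date_field) with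
    | none =>
      simp only [adVals, List.filterMap_cons, h, Option.map_none] at hy
      exact ih ⟨y, hy, hne⟩
    | some p =>
      simp only [adVals, List.filterMap_cons, h, Option.map_some, List.mem_cons] at hy
      show (if p.2 ≠ f then true else adGo date_field rs (some f)) = true
      by_cases hpf : p.2 = f
      · rw [if_neg (by simp [hpf])]
        rcases hy with rfl | hy
        · exact absurd hpf hne
        · exact ih ⟨y, hy, hne⟩
      · simp [hpf]

theorem adGo_none_of_pre (date_field : String) :
    ∀ (results : List (List (String × String))),
      Pre_assert_dates_different results date_field →
      adGo date_field results none = true := by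
  intro results
  induction results with
  | nil => rintro ⟨x, hx, _⟩; cases hx
  | cons r rs ih =>
    rintro ⟨x, hx, y, hy, hne⟩
    simp only [adGo]
    cases h : r.find? (fun p => p.1 == date_field) with
    | none =>
      simp only [adVals, List.filterMap_cons, h, Option.map_none] at hx hy
      exact ih ⟨x, hx, y, hy, hne⟩
    | some p =>
      simp only [adVals, List.filterMap_cons, h, Option.map_some, List.mem_cons] at hx hy
      -- one of x, y differs from p.2 and lies in the tail values
      apply adGo_some_of_exists
      by_cases hxp : x = p.2
      · rcases hy with rfl | hy
        · exact absurd hxp hne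
        · exact ⟨y, hy, fun h => hne (hxp.trans h.symm)⟩
      · rcases hx with rfl | hx
        · exact absurd rfl hxp
        · exact ⟨x, hx, hxp⟩

-- ===== VERDICT (by name: the statement is the Claim_ definition above) =====
theorem assert_dates_different_spec : Claim_equal_assert_dates_different := by
  intro results date_field _ hpre
  unfold Spec_assert_dates_different
  -- B = true
  rw [show assert_dates_different_alt results date_field = true from
    adGo_none_of_pre date_field results hpre]
  -- A = true
  obtain ⟨x, hx, y, hy, hne⟩ := hpre
  unfold assert_dates_different
  rw [ad_fold_eq_ofList]
  have hof : (adVals results date_field).foldl PySem.Set.add PySem.Set.empty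
      = PySem.Set.ofList (adVals results date_field) :=
    (PySem.Set.ofList_eq_foldl _).symm
  rw [hof]
  have hx' : x ∈ PySem.Set.ofList (adVals results date_field) :=
    (PySem.Set.mem_ofList _ _).2 hx
  have hy' : y ∈ PySem.Set.ofList (adVals results date_field) :=
    (PySem.Set.mem_ofList _ _).2 hy
  simp [two_mem_length hx' hy' hne]
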